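-- pv_equiv track=rewrite | github.com/notyourbasiclocksmith/aigoogleads | backend/app/services/campaign_compliance.py | _check_headline_diversity
-- ===== SOURCE A (Python) =====
-- from typing import Dict, Any, List, Optional, Tuple
--
-- def _check_headline_diversity(headlines: List[str], theme: str) -> set:
--     """Check which headline diversity categories are covered."""
--     categories_hit = set()
--     theme_lower = theme.lower()
--
--     cta_words = {"call", "book", "get", "schedule", "free", "start", "save", "try", "contact", "request"}
--     trust_words = {"licensed", "insured", "rated", "star", "★", "trusted", "certified", "years", "guarantee", "warranty"}
--     urgency_words = {"now", "today", "24/7", "emergency", "fast", "same-day", "available", "open", "immediate", "quick"}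
--     offer_words = {"free", "off", "%", "$", "discount", "save", "deal", "special", "coupon", "promo"}
--
--     for h in headlines:
--         h_lower = h.lower()
--         words = set(h_lower.split())
--
--         if theme_lower and theme_lower in h_lower:
--             categories_hit.add("keyword_relevance")
--         if any(w in words for w in cta_words):
--             categories_hit.add("cta_action")
--         if any(w in h_lower for w in trust_words):
--             categories_hit.add("trust_social_proof")
--         if any(w in h_lower for w in urgency_words):
--             categories_hit.add("urgency_availability")
--         if any(w in h_lower for w in offer_words):
--             categories_hit.add("offer_promotion")
--
--     return categories_hit
-- ===== SOURCE B (Python) =====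
-- def _check_headline_diversity(headlines, theme):
--     """Check which headline diversity categories are covered."""
--     theme_lower = theme.lower()
--
--     cta_words = ["call", "book", "get", "schedule", "free", "start", "save", "try", "contact", "request"]
--     trust_words = ["licensed", "insured", "rated", "star", "\u2605", "trusted", "certified", "years", "guarantee", "warranty"]
--     urgency_words = ["now", "today", "24/7", "emergency", "fast", "same-day", "available", "open", "immediate", "quick"]
--     offer_words = ["free", "off", "%", "$", "discount", "save", "deal", "special", "coupon", "promo"]
--
--     def hits(category, hl):
--         if category == "keyword_relevance":
--             return bool(theme_lower) and theme_lower in hl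
--         if category == "cta_action":
--             toks = hl.split()
--             return any(w in toks for w in cta_words)
--         if category == "trust_social_proof":
--             return any(w in hl for w in trust_words)
--         if category == "urgency_availability":
--             return any(w in hl for w in urgency_words)
--         return any(w in hl for w in offer_words)
--
--     found = []
--     remaining = ["keyword_relevance", "cta_action", "trust_social_proof",
--                  "urgency_availability", "offer_promotion"]
--     for h in headlines:
--         if not remaining:
--             break
--         hl = h.lower()
--         found += [c for c in remaining if hits(c, hl)]
--         remaining = [c for c in remaining if not hits(c, hl)]
--     return set(found)
-- ===== Notes on version B (the rewrite author's own statement) =====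
-- stated objective: alternative
-- what changed: A accumulates a set by re-testing all five category predicates on every headline; B keeps a shrinking worklist of still-missing categories, partitions it against each headline, and skips the rest of the scan once the worklist is empty.
import Mathlib
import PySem

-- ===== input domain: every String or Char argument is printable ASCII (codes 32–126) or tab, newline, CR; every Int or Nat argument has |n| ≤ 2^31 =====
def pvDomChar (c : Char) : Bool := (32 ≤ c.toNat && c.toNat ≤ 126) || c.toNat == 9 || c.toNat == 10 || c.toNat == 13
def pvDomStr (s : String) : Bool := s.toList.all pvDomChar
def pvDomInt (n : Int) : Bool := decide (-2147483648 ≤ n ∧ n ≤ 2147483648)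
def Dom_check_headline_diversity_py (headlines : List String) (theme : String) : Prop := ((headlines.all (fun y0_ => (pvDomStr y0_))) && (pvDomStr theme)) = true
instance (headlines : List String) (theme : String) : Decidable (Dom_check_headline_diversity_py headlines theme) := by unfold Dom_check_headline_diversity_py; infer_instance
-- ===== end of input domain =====

-- B replaces A's accumulate-into-a-set loop (re-testing all five categories on every
-- headline) by a shrinking worklist of the still-missing categories, partitioned per
-- headline, stopping once every category is found (objective: alternative).

-- word lists (the literal sets of A / lists of B; consumed only by order-independent `any`)
def pvCtaWords : List String := ["call", "book", "get", "schedule", "free", "start", "save", "try", "contact", "request"]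
def pvTrustWords : List String := ["licensed", "insured", "rated", "star", "★", "trusted", "certified", "years", "guarantee", "warranty"]
def pvUrgencyWords : List String := ["now", "today", "24/7", "emergency", "fast", "same-day", "available", "open", "immediate", "quick"]
def pvOfferWords : List String := ["free", "off", "%", "$", "discount", "save", "deal", "special", "coupon", "promo"]

-- ===== PORT A =====
-- A's loop body: five conditional set-adds per headline
def pvStepA (theme_lower : String) (categories_hit : PySem.Set String) (h : String) : PySem.Set String :=
  let h_lower := PySem.Str.lower h
  let words : PySem.Set String := PySem.Set.ofList (PySem.Str.split₀ h_lower)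
  let s1 := if (!(theme_lower == "")) && PySem.Str.isIn theme_lower h_lower then PySem.Set.add categories_hit "keyword_relevance" else categories_hit
  let s2 := if pvCtaWords.any (fun w => PySem.Set.contains words w) then PySem.Set.add s1 "cta_action" else s1
  let s3 := if pvTrustWords.any (fun w => PySem.Str.isIn w h_lower) then PySem.Set.add s2 "trust_social_proof" else s2
  let s4 := if pvUrgencyWords.any (fun w => PySem.Str.isIn w h_lower) then PySem.Set.add s3 "urgency_availability" else s3
  if pvOfferWords.any (fun w => PySem.Str.isIn w h_lower) then PySem.Set.add s4 "offer_promotion" else s4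

def check_headline_diversity_py (headlines : List String) (theme : String) : List String :=
  let theme_lower := PySem.Str.lower theme
  headlines.foldl (pvStepA theme_lower) PySem.Set.empty

-- ===== PORT B =====
def pvCats : List String := ["keyword_relevance", "cta_action", "trust_social_proof", "urgency_availability", "offer_promotion"]

-- B's helper `hits(category, hl)`
def pvHits (theme_lower : String) (category : String) (hl : String) : Bool :=
  if category == "keyword_relevance" then
    (!(theme_lower == "")) && PySem.Str.isIn theme_lower hl
  else if category == "cta_action" then
    let toks := PySem.Str.split₀ hl
    pvCtaWords.any (fun w => toks.contains w)
  else if category == "trust_social_proof" then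
    pvTrustWords.any (fun w => PySem.Str.isIn w hl)
  else if category == "urgency_availability" then
    pvUrgencyWords.any (fun w => PySem.Str.isIn w hl)
  else
    pvOfferWords.any (fun w => PySem.Str.isIn w hl)

-- B's loop body over (found, remaining); Python's `break` on an empty worklist = no-op here
def pvStepB (theme_lower : String) (st : List String × List String) (h : String) : List String × List String :=
  if st.2 == [] then st
  else
    let hl := PySem.Str.lower h
    (st.1 ++ st.2.filter (fun c => pvHits theme_lower c hl),
     st.2.filter (fun c => !(pvHits theme_lower c hl)))

def check_headline_diversity_py_alt (headlines : List String) (theme : String) : List String :=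
  let theme_lower := PySem.Str.lower theme
  (headlines.foldl (pvStepB theme_lower) ([], pvCats)).1

-- ===== PRECONDITION & SPEC =====
def Spec_check_headline_diversity_py (headlines : List String) (theme : String) (out : List String) : Prop := out = check_headline_diversity_py_alt headlines theme
instance (headlines : List String) (theme : String) (out : List String) : Decidable (Spec_check_headline_diversity_py headlines theme out) := by unfold Spec_check_headline_diversity_py; infer_instance

-- ===== CLAIM (what is proved, stated in full; the proofs are below) =====
def Claim_equal_check_headline_diversity_py : Prop := ∀ (headlines : List String) (theme : String), Dom_check_headline_diversity_py headlines theme → Spec_check_headline_diversity_py headlines theme (check_headline_diversity_py headlines theme)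

-- ===== LEMMAS AND PROOFS =====

-- the categories one headline hits, in A's fixed test order
def pvCatsOf (theme_lower hl : String) : List String :=
  pvCats.filter (fun c => pvHits theme_lower c hl)

lemma pvNodup_catsOf (tl hl : String) : (pvCatsOf tl hl).Nodup :=
  List.Nodup.filter _ (by decide)

-- A's loop body is one Set.update along the hit categories
lemma pvStepA_eq_update (tl : String) (S : PySem.Set String) (h : String) :
    pvStepA tl S h = PySem.Set.update S (pvCatsOf tl (PySem.Str.lower h)) := by
  have g1 : ((!(tl == "")) && PySem.Str.isIn tl (PySem.Str.lower h)) = pvHits tl "keyword_relevance" (PySem.Str.lower h) := by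
    simp [pvHits]
  have g2 : (pvCtaWords.any fun w => PySem.Set.contains (PySem.Set.ofList (PySem.Str.split₀ (PySem.Str.lower h))) w) = pvHits tl "cta_action" (PySem.Str.lower h) := by
    simp [pvHits]
  have g3 : (pvTrustWords.any fun w => PySem.Str.isIn w (PySem.Str.lower h)) = pvHits tl "trust_social_proof" (PySem.Str.lower h) := by
    simp [pvHits]
  have g4 : (pvUrgencyWords.any fun w => PySem.Str.isIn w (PySem.Str.lower h)) = pvHits tl "urgency_availability" (PySem.Str.lower h) := by
    simp [pvHits]
  have g5 : (pvOfferWords.any fun w => PySem.Str.isIn w (PySem.Str.lower h)) = pvHits tl "offer_promotion" (PySem.Str.lower h) := by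
    simp [pvHits]
  unfold pvStepA pvCatsOf pvCats
  simp only []
  rw [g1, g2, g3, g4, g5]
  cases hb1 : pvHits tl "keyword_relevance" (PySem.Str.lower h) <;>
  cases hb2 : pvHits tl "cta_action" (PySem.Str.lower h) <;>
  cases hb3 : pvHits tl "trust_social_proof" (PySem.Str.lower h) <;>
  cases hb4 : pvHits tl "urgency_availability" (PySem.Str.lower h) <;>
  cases hb5 : pvHits tl "offer_promotion" (PySem.Str.lower h) <;>
  simp [hb1, hb2, hb3, hb4, hb5, PySem.Set.update_cons, PySem.Set.update_nil]

-- B's step preserves the invariant 'remaining = the categories not yet found'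
lemma pvStepB_eq (tl : String) (S : PySem.Set String) (h : String) :
    pvStepB tl (S, pvCats.filter (fun c => !(S.contains c))) h
      = (pvStepA tl S h, pvCats.filter (fun c => !((pvStepA tl S h).contains c))) := by
  rw [pvStepA_eq_update]
  by_cases hrem : pvCats.filter (fun c => !(PySem.Set.contains S c)) = []
  · have hall : ∀ c ∈ pvCats, c ∈ S := by
      intro c hc
      by_contra hcs
      have hmem : c ∈ pvCats.filter (fun c => !(PySem.Set.contains S c)) := by
        simp [List.mem_filter, hc, hcs]
      rw [hrem] at hmem
      simp at hmem
    have hupd : PySem.Set.update S (pvCatsOf tl (PySem.Str.lower h)) = S := by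
      rw [PySem.Set.update_eq_append_filter]
      have hnil : (PySem.Set.ofList (pvCatsOf tl (PySem.Str.lower h))).filter
          (fun y => !(PySem.Set.contains S y)) = [] := by
        rw [List.filter_eq_nil_iff]
        intro c hc
        have hcp : c ∈ pvCats :=
          List.mem_of_mem_filter ((PySem.Set.mem_ofList _ _).mp hc)
        simp [hall c hcp]
      rw [hnil]
      simp
    rw [hupd, hrem]
    simp [pvStepB]
  · have hne : ((pvCats.filter fun c => !(PySem.Set.contains S c)) == []) = false := by
      simpa using hrem
    simp only [pvStepB, hne, Bool.false_eq_true, if_false, Prod.mk.injEq]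
    constructor
    · -- found ++ newly-hit = Set.update along the hit categories
      rw [PySem.Set.update_eq_append_filter,
          PySem.Set.ofList_eq_self_of_nodup _ (pvNodup_catsOf tl (PySem.Str.lower h))]
      congr 1
      rw [pvCatsOf, List.filter_filter, List.filter_filter]
      apply List.filter_congr
      intro c _
      exact Bool.and_comm _ _
    · -- the unhit remainder = the categories missing from the new set
      rw [List.filter_filter]
      apply List.filter_congr
      intro c hc
      by_cases hS : c ∈ S <;> by_cases hp : pvHits tl c (PySem.Str.lower h) = true <;>
        simp [hS, hp, PySem.Set.mem_update, pvCatsOf, List.mem_filter, hc]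

lemma pvFold_eq (tl : String) (hs : List String) (S : PySem.Set String) :
    hs.foldl (pvStepA tl) S
      = (hs.foldl (pvStepB tl) (S, pvCats.filter (fun c => !(S.contains c)))).1 := by
  induction hs generalizing S with
  | nil => rfl
  | cons h hs ih =>
    simp only [List.foldl_cons]
    rw [pvStepB_eq]
    exact ih _

-- ===== VERDICT (by name: the statement is the Claim_ definition above) =====
theorem check_headline_diversity_py_spec : Claim_equal_check_headline_diversity_py := by
  intro headlines theme _
  show check_headline_diversity_py headlines theme = check_headline_diversity_py_alt headlines theme
  unfold check_headline_diversity_py check_headline_diversity_py_alt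
  rw [pvFold_eq]
  have h0 : pvCats.filter (fun c => !(PySem.Set.contains PySem.Set.empty c)) = pvCats := by decide
  rw [h0]
  rfl
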